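-- pv_equiv track=rewrite | github.com/locchh/commit-explorer | src/commit_explorer/export.py | _filter_diff_by_paths
-- ===== SOURCE A (Python) =====
-- from typing import IO, Iterable, Optional
--
-- def _filter_diff_by_paths(diff_text: str, paths: Iterable[str]) -> str:
--     """Return only the hunks of ``diff_text`` whose file header matches ``paths``.
--
--     A hunk starts at ``diff --git a/<path> b/<path>`` and runs until the next
--     ``diff --git`` line or end-of-text.
--     """
--     wanted = set(paths)
--     if not wanted:
--         return diff_text
--     out: list[str] = []
--     keep = False
--     for line in diff_text.splitlines():
--         if line.startswith("diff --git "):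
--             # "diff --git a/<path> b/<path>" — pull the path from the "a/" token
--             toks = line.split(" ")
--             keep = False
--             if len(toks) >= 3 and toks[2].startswith("a/"):
--                 keep = toks[2][2:] in wanted
--         if keep:
--             out.append(line)
--     return "\n".join(out)
-- ===== SOURCE B (Python) =====
-- def _filter_diff_by_paths(diff_text: str, paths) -> str:
--     """Hunk-partition re-implementation: span whole hunks with an index scan
--     and keep or drop each hunk as a block (same return value as the flag loop)."""
--     wanted = set(paths)
--     if not wanted:
--         return diff_text
--     lines = diff_text.splitlines()
--     n = len(lines)
--     out = []
--     i = 0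
--     while i < n:
--         if not lines[i].startswith("diff --git "):
--             i += 1
--             continue
--         j = i + 1
--         while j < n and not lines[j].startswith("diff --git "):
--             j += 1
--         toks = lines[i].split(" ")
--         if len(toks) >= 3 and toks[2].startswith("a/") and toks[2][2:] in wanted:
--             out.extend(lines[i:j])
--         i = j
--     return "\n".join(out)
-- ===== Notes on version B (the rewrite author's own statement) =====
-- stated objective: alternative
-- what changed: Replaces the per-line loop carrying a keep flag with a two-level index scan that spans each hunk as a whole block (header plus body) and keeps or drops it in one decision.
import Mathlib
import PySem

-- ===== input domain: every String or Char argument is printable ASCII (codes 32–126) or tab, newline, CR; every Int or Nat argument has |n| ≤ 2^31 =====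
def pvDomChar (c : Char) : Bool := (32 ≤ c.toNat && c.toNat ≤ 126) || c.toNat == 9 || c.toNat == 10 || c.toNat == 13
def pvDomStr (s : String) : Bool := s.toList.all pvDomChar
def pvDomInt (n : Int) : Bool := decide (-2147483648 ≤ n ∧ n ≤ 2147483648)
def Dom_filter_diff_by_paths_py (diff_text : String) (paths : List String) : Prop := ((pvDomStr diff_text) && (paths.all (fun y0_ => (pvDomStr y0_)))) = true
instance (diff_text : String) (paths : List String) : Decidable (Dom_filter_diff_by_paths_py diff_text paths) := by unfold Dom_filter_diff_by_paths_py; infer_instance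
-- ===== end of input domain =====

-- B replaces A's per-line keep-flag loop by a hunk-spanning scan that keeps or drops whole hunks; same return value (alternative decomposition, no speed claim).


-- ===== PORT A =====
-- one step of A's for-loop over the lines: state = (out, keep)
def pvStepA (wanted : PySem.Set String) (st : List String × Bool) (line : String) : List String × Bool :=
  let keep :=
    if PySem.Str.startswith line "diff --git " then
      let toks := (PySem.Str.split? line " ").getD []
      if 3 ≤ toks.length then
        let t2 := toks.getD 2 ""
        if PySem.Str.startswith t2 "a/" then
          PySem.Set.contains wanted (PySem.Str.slice t2 (some 2) none)
        else false
      else false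
    else st.2
  (if keep then st.1 ++ [line] else st.1, keep)

def filter_diff_by_paths_py (diff_text : String) (paths : List String) : String :=
  let wanted : PySem.Set String := PySem.Set.ofList paths
  if wanted.isEmpty then diff_text
  else
    PySem.Str.join "\n"
      (((PySem.Str.splitlines diff_text).foldl (pvStepA wanted) ([], false)).1)

-- ===== PORT B =====
def pvIsHeaderB (line : String) : Bool := PySem.Str.startswith line "diff --git "

def pvKeepHeaderB (wanted : PySem.Set String) (line : String) : Bool :=
  let toks := (PySem.Str.split? line " ").getD []
  decide (3 ≤ toks.length) && PySem.Str.startswith (toks.getD 2 "") "a/"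
    && PySem.Set.contains wanted (PySem.Str.slice (toks.getD 2 "") (some 2) none)

-- B's outer while-loop: skip non-header lines; at a header, span the whole hunk
-- (takeWhile/dropWhile = the inner while-loop advancing j) and keep or drop it as a block.
def pvScanB (wanted : PySem.Set String) : List String → List String
  | [] => []
  | l :: rest =>
    if pvIsHeaderB l then
      (if pvKeepHeaderB wanted l then l :: rest.takeWhile (fun x => !pvIsHeaderB x) else [])
        ++ pvScanB wanted (rest.dropWhile (fun x => !pvIsHeaderB x))
    else pvScanB wanted rest
termination_by lines => lines.length
decreasing_by
  · exact Nat.lt_succ_of_le (List.length_dropWhile_le _ _)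
  · exact Nat.lt_succ_self _

def filter_diff_by_paths_py_alt (diff_text : String) (paths : List String) : String :=
  let wanted : PySem.Set String := PySem.Set.ofList paths
  if wanted.isEmpty then diff_text
  else PySem.Str.join "\n" (pvScanB wanted (PySem.Str.splitlines diff_text))

-- ===== PRECONDITION & SPEC =====
def Spec_filter_diff_by_paths_py (diff_text : String) (paths : List String) (out : String) : Prop := out = filter_diff_by_paths_py_alt diff_text paths
instance (diff_text : String) (paths : List String) (out : String) : Decidable (Spec_filter_diff_by_paths_py diff_text paths out) := by unfold Spec_filter_diff_by_paths_py; infer_instance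

-- ===== CLAIM (what is proved, stated in full; the proofs are below) =====
def Claim_equal_filter_diff_by_paths_py : Prop := ∀ (diff_text : String) (paths : List String), Dom_filter_diff_by_paths_py diff_text paths → Spec_filter_diff_by_paths_py diff_text paths (filter_diff_by_paths_py diff_text paths)

-- ===== LEMMAS AND PROOFS =====

-- A's keep computation at a header line is B's whole-header test
lemma stepA_header (w : PySem.Set String) (st : List String × Bool) (line : String)
    (h : pvIsHeaderB line = true) :
    pvStepA w st line
      = ((if pvKeepHeaderB w line then st.1 ++ [line] else st.1), pvKeepHeaderB w line) := by
  simp only [pvStepA, pvKeepHeaderB, pvIsHeaderB] at *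
  rw [h]
  simp only [if_true]
  split_ifs with h1 h2 <;> simp_all
  omega

lemma stepA_nonheader (w : PySem.Set String) (st : List String × Bool) (line : String)
    (h : pvIsHeaderB line = false) :
    pvStepA w st line = ((if st.2 then st.1 ++ [line] else st.1), st.2) := by
  simp only [pvStepA, pvIsHeaderB] at *
  rw [h]
  simp

-- pvScanB skips leading non-header lines, so dropping them first changes nothing
lemma scanB_dropWhile (w : PySem.Set String) :
    ∀ (xs : List String), pvScanB w (xs.dropWhile (fun x => !pvIsHeaderB x)) = pvScanB w xs := by
  intro xs
  induction xs with
  | nil => rfl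
  | cons x rest ih =>
    by_cases h : pvIsHeaderB x
    · simp [h]
    · rw [List.dropWhile_cons]
      simp only [h, Bool.not_false, if_pos]
      rw [ih, pvScanB, if_neg h]

-- the fold invariant: with keep = false the fold produces acc ++ pvScanB;
-- with keep = true it first copies the current hunk's remaining body lines
lemma foldA_scanB (w : PySem.Set String) :
    ∀ (lines : List String) (acc : List String),
      (lines.foldl (pvStepA w) (acc, false)).1 = acc ++ pvScanB w lines
      ∧ (lines.foldl (pvStepA w) (acc, true)).1
          = acc ++ lines.takeWhile (fun x => !pvIsHeaderB x)
              ++ pvScanB w (lines.dropWhile (fun x => !pvIsHeaderB x)) := by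
  intro lines
  induction lines with
  | nil => intro acc; simp [pvScanB]
  | cons l rest ih =>
    intro acc
    by_cases h : pvIsHeaderB l
    · have hstep : ∀ b : Bool, pvStepA w (acc, b) l
          = ((if pvKeepHeaderB w l then acc ++ [l] else acc), pvKeepHeaderB w l) := by
        intro b; exact stepA_header w (acc, b) l h
      constructor
      · rw [List.foldl_cons, hstep false]
        by_cases hk : pvKeepHeaderB w l
        · rw [if_pos hk, hk, (ih (acc ++ [l])).2, pvScanB, if_pos h, if_pos hk]
          simp
        · rw [if_neg hk, Bool.of_not_eq_true hk, (ih acc).1, pvScanB, if_pos h, if_neg hk,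
              scanB_dropWhile]
          simp
      · rw [List.foldl_cons, hstep true]
        have htw : (l :: rest).takeWhile (fun x => !pvIsHeaderB x) = [] := by
          simp [h]
        have hdw : (l :: rest).dropWhile (fun x => !pvIsHeaderB x) = l :: rest := by
          simp [h]
        rw [htw, hdw]
        by_cases hk : pvKeepHeaderB w l
        · rw [if_pos hk, hk, (ih (acc ++ [l])).2, pvScanB, if_pos h, if_pos hk]
          simp
        · rw [if_neg hk, Bool.of_not_eq_true hk, (ih acc).1, pvScanB, if_pos h, if_neg hk,
              scanB_dropWhile]
          simp
    · have hstep : ∀ b : Bool, pvStepA w (acc, b) l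
          = ((if b then acc ++ [l] else acc), b) :=
        fun b => stepA_nonheader w (acc, b) l (by simpa using h)
      constructor
      · rw [List.foldl_cons, hstep false]
        simp only [if_neg (by simp : ¬ (false = true))]
        rw [(ih acc).1, pvScanB, if_neg h]
      · rw [List.foldl_cons, hstep true, if_pos rfl, (ih (acc ++ [l])).2]
        have htw : (l :: rest).takeWhile (fun x => !pvIsHeaderB x)
            = l :: rest.takeWhile (fun x => !pvIsHeaderB x) := by
          simp [h]
        have hdw : (l :: rest).dropWhile (fun x => !pvIsHeaderB x)
            = rest.dropWhile (fun x => !pvIsHeaderB x) := by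
          simp [h]
        rw [htw, hdw]
        simp

-- ===== VERDICT (by name: the statement is the Claim_ definition above) =====
theorem filter_diff_by_paths_py_spec : Claim_equal_filter_diff_by_paths_py := by
  intro diff_text paths _
  unfold Spec_filter_diff_by_paths_py filter_diff_by_paths_py filter_diff_by_paths_py_alt
  by_cases hempty : (PySem.Set.ofList paths).isEmpty
  · simp [hempty]
  · simp only [hempty, if_neg, Bool.false_eq_true, not_false_eq_true]
    rw [(foldA_scanB (PySem.Set.ofList paths) (PySem.Str.splitlines diff_text) []).1]
    rfl
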